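-- pv_equiv track=rewrite | github.com/ks-kimy/algorithm | 0207/1859.py | millionare
-- ===== SOURCE A (Python) =====
-- def millionare(prices):
--     length = len(prices)
--     max_price = prices[-1]
--     profit = 0
--
--     for i in range(length - 2, -1, -1):
--         if prices[i] < max_price:
--             profit += max_price - prices[i]
--         else:
--             max_price = prices[i]
--
--     return profit
-- ===== SOURCE B (Python) =====
-- def millionare(prices):
--     # Monotonic stack: (value, count) run-length encoding of the suffix-maximum
--     # profile; profit = sum of suffix maxima minus sum of prices.
--     stack = []
--     for p in prices:
--         c = 1
--         while stack and stack[-1][0] < p: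
--             c += stack.pop()[1]
--         stack.append((p, c))
--     return sum(v * c for v, c in stack) - sum(prices)
-- ===== Notes on version B (the rewrite author's own statement) =====
-- stated objective: alternative
-- what changed: B replaces A's backward index loop tracking a running max with a branch by a left-to-right monotonic stack that run-length-encodes the suffix-maximum profile as (value,count) pairs, returning sum(v*c) - sum(prices).
-- outside the precondition, e.g. on millionare([]): A raises IndexError, B returns 0
-- crash fix: On the empty list A raises IndexError (prices[-1]); B returns 0. — e.g. on millionare([]): A raises IndexError, B returns 0
import Mathlib
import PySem

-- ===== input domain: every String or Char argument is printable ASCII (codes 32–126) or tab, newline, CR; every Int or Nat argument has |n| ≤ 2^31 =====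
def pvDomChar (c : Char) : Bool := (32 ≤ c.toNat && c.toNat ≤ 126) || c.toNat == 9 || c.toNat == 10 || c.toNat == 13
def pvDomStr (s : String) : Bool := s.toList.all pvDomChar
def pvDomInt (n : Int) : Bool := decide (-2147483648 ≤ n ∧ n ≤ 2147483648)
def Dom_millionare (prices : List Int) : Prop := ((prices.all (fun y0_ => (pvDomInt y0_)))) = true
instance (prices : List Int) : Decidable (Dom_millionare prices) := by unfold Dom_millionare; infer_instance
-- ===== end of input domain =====

-- B replaces A's backward index loop (running max + branch) by a monotonic-stack algorithm: a left-to-right pass run-length-encodes the suffix-maximum profile in a (value,count) stack, then profit = sum of v*c minus sum of prices (alternative algorithm, same asymptotic cost; B returns 0 on [] where A raises).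


-- ===== PORT A =====
def millionare (prices : List Int) : Int :=
  ((PySem.List.pyRange ((prices.length : Int) - 2) (-1) (-1)).foldl
    (fun (st : Int × Int) i =>
      if PySem.List.pyGetD prices i 0 < st.1 then
        (st.1, st.2 + (st.1 - PySem.List.pyGetD prices i 0))
      else
        (PySem.List.pyGetD prices i 0, st.2))
    (PySem.List.pyGetD prices (-1) 0, 0)).2

-- ===== PORT B =====
-- Source B's inner `while stack and stack[-1][0] < p: c += stack.pop()[1]` + `stack.append((p, c))`;
-- the Lean list HEAD is the Python stack TOP (list end), so pop/append act on the head.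
def pvPushB (p : Int) : Int → List (Int × Int) → List (Int × Int)
  | c, [] => [(p, c)]
  | c, (v, k) :: rest => if v < p then pvPushB p (c + k) rest else (p, c) :: (v, k) :: rest

def millionare_alt (prices : List Int) : Int :=
  let stack := prices.foldl (fun st p => pvPushB p 1 st) ([] : List (Int × Int))
  (stack.map (fun vc => vc.1 * vc.2)).foldl (· + ·) 0 - prices.foldl (· + ·) 0

-- ===== PRECONDITION & SPEC =====
-- Pre_ excludes only the empty list, on which A raises IndexError (prices[-1]).
def Pre_millionare (prices : List Int) : Prop := prices ≠ []
instance (prices : List Int) : Decidable (Pre_millionare prices) := by unfold Pre_millionare; infer_instance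
def pvWitness_millionare : List Int := [1, 5, 2]

-- On the empty list A raises IndexError (prices[-1]); B returns 0.
def Raises_millionare (prices : List Int) : Prop := prices = []
instance (prices : List Int) : Decidable (Raises_millionare prices) := by unfold Raises_millionare; infer_instance
def pvRaiseWitness_millionare : List Int := []
def pvRaiseWitnessOut_millionare : Int := 0

def Spec_millionare (prices : List Int) (out : Int) : Prop := out = millionare_alt prices
instance (prices : List Int) (out : Int) : Decidable (Spec_millionare prices out) := by unfold Spec_millionare; infer_instance

-- ===== CLAIM (what is proved, stated in full; the proofs are below) =====
def Claim_equal_millionare : Prop := ∀ (prices : List Int), Dom_millionare prices → Pre_millionare prices → Spec_millionare prices (millionare prices)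
def Claim_raises_millionare : Prop := (∀ (prices : List Int), Dom_millionare prices → Raises_millionare prices → ¬ Pre_millionare prices) ∧ (Dom_millionare (pvRaiseWitness_millionare) ∧ Raises_millionare (pvRaiseWitness_millionare) ∧ millionare_alt (pvRaiseWitness_millionare) = pvRaiseWitnessOut_millionare)

-- ===== LEMMAS AND PROOFS =====

/-- Running maximum of a list starting from `m`. -/
def pvRmax (m : Int) : List Int → Int
  | [] => m
  | p :: t => pvRmax (max m p) t

/-- Total profit: sum over the list of (running max − price). -/
def pvG (m : Int) : List Int → Int
  | [] => 0
  | p :: t => (max m p - p) + pvG (max m p) t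

/-- Running-max table seeded with `m`. -/
def pvSfx (m : Int) : List Int → List Int
  | [] => []
  | p :: t => max m p :: pvSfx (max m p) t

/-- Running-max table of a nonempty list (seedless). -/
def pvR : List Int → List Int
  | [] => []
  | x :: t => x :: pvSfx x t

/-- Flatten a (value,count) stack into the sequence it encodes. -/
def pvUn : List (Int × Int) → List Int
  | [] => []
  | (v, c) :: t => List.replicate c.toNat v ++ pvUn t

/-- Stack well-formedness: positive counts, values nondecreasing from the head. -/
def pvOrd : List (Int × Int) → Prop
  | [] => True
  | (v, c) :: t => 1 ≤ c ∧ (∀ x ∈ t, v ≤ x.1) ∧ pvOrd t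

theorem pvFoldA (l : List Int) : ∀ (m prof : Int),
    l.foldl (fun (st : Int × Int) p =>
        if p < st.1 then (st.1, st.2 + (st.1 - p)) else (p, st.2)) (m, prof)
      = (pvRmax m l, prof + pvG m l) := by
  induction l with
  | nil => intro m prof; simp [pvRmax, pvG]
  | cons p t ih =>
    intro m prof
    simp only [List.foldl_cons, pvRmax, pvG]
    by_cases h : p < m
    · rw [if_pos h, ih]
      have hm : max m p = m := by omega
      rw [hm]; ring_nf
    · rw [if_neg h, ih]
      have hm : max m p = p := by omega
      rw [hm]; ring_nf

theorem pvMapRange (prices : List Int) : ∀ (m : Nat), m ≤ prices.length →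
    (PySem.List.pyRange 0 (m : Int) 1).map (fun i => PySem.List.pyGetD prices i 0)
      = prices.take m := by
  intro m
  induction m with
  | zero => intro _; simp
  | succ k ih =>
    intro h
    have hlt : k < prices.length := by omega
    rw [show ((k + 1 : Nat) : Int) = (k : Int) + 1 by push_cast; ring,
        PySem.List.pyRange_one_succ_right (by omega), List.map_append, ih (by omega),
        List.take_add_one]
    simp [PySem.List.pyGetD_natCast, List.getD, List.getElem?_eq_getElem hlt]

theorem pvGsum (l : List Int) : ∀ m : Int, pvG m l = (pvSfx m l).sum - l.sum := by
  induction l with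
  | nil => intro m; simp [pvG, pvSfx]
  | cons p t ih =>
    intro m
    simp only [pvG, pvSfx, List.sum_cons]
    rw [ih]; ring

theorem pvSfx_max (t : List Int) : ∀ p x : Int,
    pvSfx (max p x) t = (pvSfx x t).map (fun y => max p y) := by
  induction t with
  | nil => intro p x; simp [pvSfx]
  | cons y t' ih =>
    intro p x
    simp only [pvSfx, List.map_cons]
    rw [show max (max p x) y = max p (max x y) by omega, ih]

theorem pvR_cons (p : Int) (l : List Int) :
    pvR (p :: l) = p :: (pvR l).map (fun y => max p y) := by
  cases l with
  | nil => simp [pvR, pvSfx]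
  | cons x t =>
    simp only [pvR, pvSfx, List.map_cons]
    rw [pvSfx_max t p x]

theorem pvUn_lb : ∀ (st : List (Int × Int)) (b : Int), (∀ x ∈ st, b ≤ x.1) →
    ∀ y ∈ pvUn st, b ≤ y
  | [], _, _ => by simp [pvUn]
  | (v, c) :: t, b, h => by
    intro y hy
    simp only [pvUn, List.mem_append] at hy
    rcases hy with hy | hy
    · have hv : y = v := (List.mem_replicate.mp hy).2
      exact hv ▸ h (v, c) (List.mem_cons_self ..)
    · exact pvUn_lb t b (fun x hx => h x (List.mem_cons_of_mem _ hx)) y hy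

theorem pvPush_spec (p : Int) (st : List (Int × Int)) : ∀ c : Int, 1 ≤ c → pvOrd st →
    pvUn (pvPushB p c st) = List.replicate c.toNat p ++ (pvUn st).map (fun y => max p y)
      ∧ pvOrd (pvPushB p c st) := by
  induction st with
  | nil => intro c hc _; simp [pvPushB, pvUn, pvOrd, hc]
  | cons hd t ih =>
    obtain ⟨v, k⟩ := hd
    intro c hc hord
    obtain ⟨hk, hall, hordt⟩ := hord
    simp only [pvPushB]
    by_cases hv : v < p
    · rw [if_pos hv]
      obtain ⟨h1, h2⟩ := ih (c + k) (by omega) hordt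
      refine ⟨?_, h2⟩
      rw [h1]
      simp only [pvUn, List.map_append, ← List.append_assoc]
      congr 1
      have : (c + k).toNat = c.toNat + k.toNat := by omega
      rw [this, List.replicate_add]
      congr 1
      have : ∀ y ∈ List.replicate k.toNat v, max p y = p := by
        intro y hy; rw [(List.mem_replicate.mp hy).2]; omega
      rw [List.map_congr_left (fun y hy => this y hy)]
      simp
    · rw [if_neg hv]
      constructor
      · simp only [pvUn, List.map_append]
        congr 2
        · have : ∀ y ∈ List.replicate k.toNat v, max p y = y := by
            intro y hy; rw [(List.mem_replicate.mp hy).2]; omega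
          rw [List.map_congr_left this, List.map_id']
        · have hlb : ∀ y ∈ pvUn t, v ≤ y := pvUn_lb t v hall
          have : ∀ y ∈ pvUn t, max p y = y := fun y hy => by
            have := hlb y hy; omega
          rw [List.map_congr_left this, List.map_id']
      · exact ⟨hc, fun x hx => by
          rcases List.mem_cons.mp hx with rfl | hx
          · simp; omega
          · have := hall x hx; simp; omega,
          hk, hall, hordt⟩

theorem pvFoldB (xs : List Int) :
    pvUn (xs.foldl (fun st p => pvPushB p 1 st) ([] : List (Int × Int)))
      = pvR xs.reverse
    ∧ pvOrd (xs.foldl (fun st p => pvPushB p 1 st) ([] : List (Int × Int))) := by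
  induction xs using List.reverseRecOn with
  | nil => simp [pvUn, pvR, pvOrd]
  | append_singleton ys p ih =>
    obtain ⟨h1, h2⟩ := ih
    rw [List.foldl_append, List.foldl_cons, List.foldl_nil, List.reverse_append]
    obtain ⟨hp1, hp2⟩ := pvPush_spec p _ 1 le_rfl h2
    refine ⟨?_, hp2⟩
    rw [hp1, h1]
    simp [pvR_cons]

theorem pvUn_sum : ∀ (st : List (Int × Int)), pvOrd st → ∀ init : Int,
    (st.map (fun vc => vc.1 * vc.2)).foldl (· + ·) init = init + (pvUn st).sum
  | [], _, init => by simp [pvUn]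
  | (v, c) :: t, h, init => by
    obtain ⟨hc, _, hordt⟩ := h
    simp only [List.map_cons, List.foldl_cons, pvUn, List.sum_append, List.sum_replicate]
    rw [pvUn_sum t hordt]
    have h1 : c.toNat • v = v * c := by
      have h2 : (c.toNat : Int) = c := by omega
      rw [nsmul_eq_mul, h2]; ring
    rw [h1]; ring

theorem millionare_eq_alt (prices : List Int) (hne : prices ≠ []) :
    millionare prices = millionare_alt prices := by
  have hlen : 1 ≤ prices.length := by
    cases prices with
    | nil => exact absurd rfl hne
    | cons a t => simp
  -- A side
  have hrange : PySem.List.pyRange ((prices.length : Int) - 2) (-1) (-1)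
      = (PySem.List.pyRange 0 ((prices.length : Int) - 1) 1).reverse := by
    rw [PySem.List.pyRange_neg_one_eq_reverse,
        show (-1 : Int) + 1 = 0 by ring,
        show ((prices.length : Int) - 2 + 1) = (prices.length : Int) - 1 by ring]
  have hcast : ((prices.length : Int) - 1) = ((prices.length - 1 : Nat) : Int) := by
    omega
  have hmap : (PySem.List.pyRange 0 ((prices.length : Int) - 1) 1).map
        (fun i => PySem.List.pyGetD prices i 0) = prices.dropLast := by
    rw [hcast, pvMapRange prices (prices.length - 1) (by omega), List.dropLast_eq_take]
  have hA : millionare prices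
      = pvG (prices.getLast hne) prices.dropLast.reverse := by
    have hfold : ∀ (r : List Int) (init : Int × Int),
        r.foldl (fun (st : Int × Int) i =>
            if PySem.List.pyGetD prices i 0 < st.1 then
              (st.1, st.2 + (st.1 - PySem.List.pyGetD prices i 0))
            else (PySem.List.pyGetD prices i 0, st.2)) init
          = (r.map (fun i => PySem.List.pyGetD prices i 0)).foldl
              (fun (st : Int × Int) p =>
                if p < st.1 then (st.1, st.2 + (st.1 - p)) else (p, st.2)) init :=
      fun r init => by rw [List.foldl_map]
    unfold millionare
    rw [hrange, PySem.List.pyGetD_neg_one prices 0 hne, hfold, List.map_reverse, hmap,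
        pvFoldA]
    simp
  -- B side
  obtain ⟨hUn, hOrd⟩ := pvFoldB prices
  have hrev : prices.reverse = prices.getLast hne :: prices.dropLast.reverse := by
    conv_lhs => rw [← List.dropLast_concat_getLast hne]
    simp
  have hfoldsum : ∀ (l : List Int) (init : Int), l.foldl (· + ·) init = init + l.sum := by
    intro l
    induction l with
    | nil => intro init; simp
    | cons x t' ih' => intro init; simp only [List.foldl_cons, List.sum_cons]; rw [ih']; ring
  have hB : millionare_alt prices
      = (pvR prices.reverse).sum - prices.sum := by
    simp only [millionare_alt]
    rw [pvUn_sum _ hOrd 0, hUn, hfoldsum]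
    ring
  rw [hA, hB, hrev]
  simp only [pvR, List.sum_cons]
  have hsum : prices.sum = prices.dropLast.reverse.sum + prices.getLast hne := by
    conv_lhs => rw [← List.dropLast_concat_getLast hne]
    simp
  rw [pvGsum, hsum]
  ring

-- ===== VERDICT (by name: the statement is the Claim_ definition above) =====
theorem millionare_spec : Claim_equal_millionare := by
  intro prices _ hpre
  unfold Spec_millionare
  exact millionare_eq_alt prices hpre

@[simp] theorem millionare_raises : Claim_raises_millionare := by
  unfold Claim_raises_millionare
  exact ⟨fun prices _ h => by simp [Raises_millionare] at h; simp [Pre_millionare, h], by decide⟩
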